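-- pv_equiv track=rewrite | github.com/ThePlayWorldStudio/learn | sem4/aois/lab1/src/transformInt.py | fromRevBinToDec
-- ===== SOURCE A (Python) =====
-- def fromBinPToDec(bin):
--     sign = bin[0]
--     magnitudeBits = bin[1:]
--
--     value = 0
--     for i, bit in enumerate(reversed(magnitudeBits)):
--         value += bit * (2 ** i)
--
--     return -value if sign == 1 else value
--
-- def fromRevBinToDec(bin):
--     if bin[0] == 0:
--         # Положительное число — считаем как обычно
--         return fromBinPToDec(bin)
--
--     # Отрицательное число — инвертируем все биты
--     invertedBits = [1 - bit for bit in bin]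
--
--     # Считаем значение инвертированных бит (уже без знака)
--     value = 0
--     magnitudeBits = invertedBits[1:]
--     for i, bit in enumerate(reversed(magnitudeBits)):
--         value += bit * (2 ** i)
--
--     return -value
-- ===== SOURCE B (Python) =====
-- def fromRevBinToDec(bin):
--     sign = bin[0]
--     # Single magnitude-building step: invert the tail bits when the sign bit is set.
--     mag = bin[1:] if sign == 0 else [1 - b for b in bin[1:]]
--     # Horner's method, forward pass: acc = acc*2 + bit.
--     value = 0
--     for b in mag:
--         value = 2 * value + b
--     return value if sign == 0 else -value
-- ===== Notes on version B (the rewrite author's own statement) =====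
-- stated objective: faster
-- what changed: Collapsed the two duplicated sign branches into one magnitude-building step and replaced the reversed-enumerate sum of bit*2**i with a forward Horner fold acc = acc*2 + bit.
import Mathlib
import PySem

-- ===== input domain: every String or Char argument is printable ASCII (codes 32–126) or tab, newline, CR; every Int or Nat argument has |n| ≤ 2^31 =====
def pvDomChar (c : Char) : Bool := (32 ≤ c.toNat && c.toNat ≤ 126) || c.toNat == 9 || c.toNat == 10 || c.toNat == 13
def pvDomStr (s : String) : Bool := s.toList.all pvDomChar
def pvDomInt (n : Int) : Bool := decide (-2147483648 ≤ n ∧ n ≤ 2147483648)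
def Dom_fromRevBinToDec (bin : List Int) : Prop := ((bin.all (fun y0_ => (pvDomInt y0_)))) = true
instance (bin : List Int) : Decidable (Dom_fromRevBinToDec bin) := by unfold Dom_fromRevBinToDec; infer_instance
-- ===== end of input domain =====

-- B collapses A's two duplicated sign branches into one magnitude-building step and
-- converts with a forward Horner fold (acc = acc*2 + bit) instead of reversed enumerate with 2**i.
-- Equivalence of the RETURN value on all non-empty lists.

-- ===== PORT A =====
def fromBinPToDec (bin : List Int) : Int :=
  match PySem.List.pyGet? bin 0 with
  | none => 0   -- unreachable under Pre_ (bin ≠ [])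
  | some sign =>
    let magnitudeBits := PySem.List.slice bin (some 1) none
    let value := (PySem.List.enumerate magnitudeBits.reverse 0).foldl
      (fun v p => v + p.2 * (2 : Int) ^ p.1.toNat) 0
    if sign == 1 then -value else value

def fromRevBinToDec (bin : List Int) : Int :=
  match PySem.List.pyGet? bin 0 with
  | none => 0   -- unreachable under Pre_ (bin ≠ [])
  | some b0 =>
    if b0 == 0 then fromBinPToDec bin
    else
      let invertedBits := bin.map (fun bit => 1 - bit)
      let magnitudeBits := PySem.List.slice invertedBits (some 1) none
      let value := (PySem.List.enumerate magnitudeBits.reverse 0).foldl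
        (fun v p => v + p.2 * (2 : Int) ^ p.1.toNat) 0;
      -value

-- ===== PORT B =====
def fromRevBinToDec_alt (bin : List Int) : Int :=
  match PySem.List.pyGet? bin 0 with
  | none => 0   -- unreachable under Pre_ (bin ≠ [])
  | some sign =>
    let mag := if sign == 0 then PySem.List.slice bin (some 1) none
               else (PySem.List.slice bin (some 1) none).map (fun b => 1 - b)
    let value := mag.foldl (fun a b => 2 * a + b) 0
    if sign == 0 then value else -value

-- ===== PRECONDITION & SPEC =====
-- A raises IndexError on the empty list (bin[0]); excluded.
def Pre_fromRevBinToDec (bin : List Int) : Prop := bin ≠ []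
instance (bin : List Int) : Decidable (Pre_fromRevBinToDec bin) := by unfold Pre_fromRevBinToDec; infer_instance
def pvWitness_fromRevBinToDec : List Int := [1, 0, 1, 1]

def Spec_fromRevBinToDec (bin : List Int) (out : Int) : Prop := out = fromRevBinToDec_alt bin
instance (bin : List Int) (out : Int) : Decidable (Spec_fromRevBinToDec bin out) := by unfold Spec_fromRevBinToDec; infer_instance

-- ===== CLAIM (what is proved, stated in full; the proofs are below) =====
def Claim_equal_fromRevBinToDec : Prop := ∀ (bin : List Int), Dom_fromRevBinToDec bin → Pre_fromRevBinToDec bin → Spec_fromRevBinToDec bin (fromRevBinToDec bin)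

-- ===== LEMMAS AND PROOFS =====

-- Pbits l = Σ l[i] * 2^i (little-endian value of a bit list)
def Pbits : List Int → Int
  | [] => 0
  | b :: t => b + 2 * Pbits t

theorem Pbits_append_singleton (l : List Int) (b : Int) :
    Pbits (l ++ [b]) = Pbits l + b * 2 ^ l.length := by
  induction l with
  | nil => simp [Pbits]
  | cons x t ih => simp [Pbits, ih, List.length_cons]; ring

-- A's loop: sum of bit * 2^i over enumerate of a list, generalized over start and accumulator.
theorem enum_pow_foldl (l : List Int) : ∀ (s : Nat) (v : Int),
    (PySem.List.enumerate l (s : Int)).foldl (fun v p => v + p.2 * (2 : Int) ^ p.1.toNat) v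
      = v + 2 ^ s * Pbits l := by
  induction l with
  | nil => intro s v; simp [PySem.List.enumerate_nil, Pbits]
  | cons b t ih =>
    intro s v
    rw [PySem.List.enumerate_cons]
    simp only [List.foldl_cons]
    have h1 : ((s : Int) + 1) = ((s + 1 : Nat) : Int) := by push_cast; ring
    rw [h1, ih (s + 1)]
    simp [Pbits, Int.toNat_natCast, pow_succ]
    ring

-- B's loop: forward Horner fold equals the little-endian value of the reversed list.
theorem horner_foldl (l : List Int) : ∀ (a : Int),
    l.foldl (fun x b => 2 * x + b) a = a * 2 ^ l.length + Pbits l.reverse := by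
  induction l with
  | nil => intro a; simp [Pbits]
  | cons b t ih =>
    intro a
    simp only [List.foldl_cons, List.reverse_cons, List.length_cons]
    rw [ih (2 * a + b), Pbits_append_singleton]
    simp [pow_succ]
    ring

-- ===== VERDICT (by name: the statement is the Claim_ definition above) =====
theorem fromRevBinToDec_spec : Claim_equal_fromRevBinToDec := by
  intro bin _ hpre
  match bin with
  | [] => exact absurd rfl hpre
  | s :: rest =>
    unfold Spec_fromRevBinToDec fromRevBinToDec fromRevBinToDec_alt fromBinPToDec
    have hget : PySem.List.pyGet? (s :: rest) (0 : Int) = some s := by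
      simp [PySem.List.pyGet?, PySem.List.pyIdx?]
    have hgetm : PySem.List.pyGet? ((s :: rest).map (fun bit => 1 - bit)) (0 : Int)
        = some (1 - s) := by
      simp [PySem.List.pyGet?, PySem.List.pyIdx?]
    rw [hget]
    by_cases hs : s = 0
    · subst hs
      simp only [beq_self_eq_true, if_true, PySem.List.slice_from_one, List.tail_cons]
      rw [show PySem.List.enumerate rest.reverse = PySem.List.enumerate rest.reverse ((0 : Nat) : Int) by norm_num,
          enum_pow_foldl rest.reverse 0 0, horner_foldl rest 0]
      simp
    · have hb : (s == 0) = false := by simp [hs]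
      simp only [hb, Bool.false_eq_true, if_false, PySem.List.slice_from_one,
        List.map_cons, List.tail_cons]
      rw [show PySem.List.enumerate (rest.map (fun bit => 1 - bit)).reverse
            = PySem.List.enumerate (rest.map (fun bit => 1 - bit)).reverse ((0 : Nat) : Int) by norm_num,
          enum_pow_foldl (rest.map (fun bit => 1 - bit)).reverse 0 0,
          horner_foldl (rest.map (fun b => 1 - b)) 0]
      simp
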